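-- pv_equiv track=rewrite | github.com/vegber/INF273 | implementation/operator_helper_class.py | find_zero_swaps
-- ===== SOURCE A (Python) =====
-- def find_zero_swaps(arr):
--     """
--     :returns exact index of possible sol. remember
--     to add +1 in your insert method.
--     :param arr:
--     :return:
--     """
--     backlog = []
--     valid_pos = []
--     for i, elem in enumerate(arr):
--         if elem == 0:
--             valid_pos.append(i)
--             continue
--         backlog.append(elem)
--         if backlog.count(elem) == 2:
--             backlog.remove(elem)
--             backlog.remove(elem)
--         if len(backlog) == 0:
--             valid_pos.append(i)
--
--     return valid_pos
-- ===== SOURCE B (Python) =====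
-- def find_zero_swaps(arr):
--     def balanced(prefix):
--         counts = {}
--         for v in prefix:
--             if v != 0:
--                 counts[v] = counts.get(v, 0) + 1
--         return all(c % 2 == 0 for c in counts.values())
--
--     return [i for i, e in enumerate(arr) if e == 0 or balanced(arr[:i + 1])]
-- ===== Notes on version B (the rewrite author's own statement) =====
-- stated objective: alternative
-- what changed: Replaces A's stateful single pass carrying a cancelling backlog list by a stateless staged check: for every index a fresh counter dict over the prefix arr[:i+1] decides whether each nonzero value occurs an even number of times.
import Mathlib
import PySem

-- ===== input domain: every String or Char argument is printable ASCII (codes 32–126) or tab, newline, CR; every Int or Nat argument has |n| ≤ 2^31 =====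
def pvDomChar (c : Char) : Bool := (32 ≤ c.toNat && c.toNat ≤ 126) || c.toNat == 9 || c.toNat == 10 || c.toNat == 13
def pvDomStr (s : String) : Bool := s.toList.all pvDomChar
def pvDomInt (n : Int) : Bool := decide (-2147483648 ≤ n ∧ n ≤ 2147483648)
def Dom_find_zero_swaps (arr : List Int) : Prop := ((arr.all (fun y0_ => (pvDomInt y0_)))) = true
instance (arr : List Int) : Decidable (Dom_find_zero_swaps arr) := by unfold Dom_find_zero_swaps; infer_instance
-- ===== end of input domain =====

-- B drops A's carried backlog state: it checks each index independently, counting the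
-- nonzero values of the prefix arr[:i+1] in a fresh dict and testing that every count is even.
-- Objective: alternative (stateless staged decomposition; same worst-case cost, not faster).

-- ===== PORT A =====
-- one iteration of A's loop body; state = (backlog, valid_pos)
def findZeroSwapsStepA (st : List Int × List Int) (p : Int × Int) : List Int × List Int :=
  let backlog := st.1
  let valid_pos := st.2
  if p.2 = 0 then (backlog, valid_pos ++ [p.1])
  else
    let backlog := backlog ++ [p.2]
    let backlog :=
      if PySem.List.count backlog p.2 = 2 then
        -- both list.remove calls succeed here (count = 2); getD only totalizes the Option
        let b1 := (PySem.List.remove? backlog p.2).getD backlog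
        (PySem.List.remove? b1 p.2).getD b1
      else backlog
    if backlog.length = 0 then (backlog, valid_pos ++ [p.1]) else (backlog, valid_pos)

def find_zero_swaps (arr : List Int) : List Int :=
  ((PySem.List.enumerate arr).foldl findZeroSwapsStepA ([], [])).2

-- ===== PORT B =====
-- helper 'balanced(prefix)' of Source B: count the nonzero values, test all counts even
def altBalanced (pre : List Int) : Bool :=
  (PySem.Dict.values (pre.foldl
      (fun d v => if v ≠ 0 then PySem.Dict.insert d v (PySem.Dict.getD d v 0 + 1) else d)
      PySem.Dict.empty)).all (fun c => PySem.Int.mod c 2 == 0)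

def find_zero_swaps_alt (arr : List Int) : List Int :=
  ((PySem.List.enumerate arr).filter
      (fun p => p.2 == 0 || altBalanced (PySem.List.slice arr none (some (p.1 + 1))))).map (·.1)

-- ===== PRECONDITION & SPEC =====
def Spec_find_zero_swaps (arr : List Int) (out : List Int) : Prop := out = find_zero_swaps_alt arr
instance (arr : List Int) (out : List Int) : Decidable (Spec_find_zero_swaps arr out) := by unfold Spec_find_zero_swaps; infer_instance

-- ===== CLAIM (what is proved, stated in full; the proofs are below) =====
def Claim_equal_find_zero_swaps : Prop := ∀ (arr : List Int), Dom_find_zero_swaps arr → Spec_find_zero_swaps arr (find_zero_swaps arr)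

-- ===== LEMMAS AND PROOFS =====

-- number of occurrences of v among the nonzero elements of pre
def cntNZ (pre : List Int) (v : Int) : Nat := (pre.filter (fun x => !(x == 0))).count v

-- A's backlog b represents the parity of the nonzero counts of the consumed prefix pre
def RepBacklog (b pre : List Int) : Prop :=
  b.Nodup ∧ ∀ v, v ∈ b ↔ ¬ 2 ∣ cntNZ pre v

theorem repBacklog_nil : RepBacklog [] [] := by
  constructor
  · exact List.nodup_nil
  · intro v; simp [cntNZ]

theorem cntNZ_append_zero (pre : List Int) (v : Int) : cntNZ (pre ++ [0]) v = cntNZ pre v := by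
  simp [cntNZ]

theorem cntNZ_append_ne (pre : List Int) (e v : Int) (he : e ≠ 0) :
    cntNZ (pre ++ [e]) v = cntNZ pre v + (if v = e then 1 else 0) := by
  simp [cntNZ, List.count_append, he, List.count_singleton]
  split
  · simp_all
  · simp_all
    omega

-- Source B's counting loop over pre equals the same loop over the nonzero elements of pre
theorem foldl_dict_filter (l : List Int) (d : PySem.Dict Int Int) :
    l.foldl (fun d v => if v ≠ 0 then PySem.Dict.insert d v (PySem.Dict.getD d v 0 + 1) else d) d
      = (l.filter (fun x => !(x == 0))).foldl
          (fun d v => PySem.Dict.insert d v (PySem.Dict.getD d v 0 + 1)) d := by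
  induction l generalizing d with
  | nil => rfl
  | cons x l ih =>
    simp only [List.foldl_cons, List.filter_cons]
    by_cases hx : x = 0
    · rw [if_neg (show ¬ x ≠ 0 from by simpa using hx),
        if_neg (show ¬ ((!(x == 0)) = true) from by simp [hx])]
      exact ih d
    · rw [if_pos hx, if_pos (show (!(x == 0)) = true from by simp [hx])]
      simp only [List.foldl_cons]
      exact ih _

-- characterisation of Source B's balanced(prefix)
theorem altBalanced_iff (pre : List Int) :
    altBalanced pre = true ↔ ∀ v, ¬ 2 ∣ cntNZ pre v → False := by
  unfold altBalanced
  rw [foldl_dict_filter, PySem.Dict.foldl_insert_getD_add_one_eq_counter]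
  simp only [PySem.Dict.values, PySem.Dict.items_counter, List.map_map, List.all_map,
    List.all_eq_true, Function.comp]
  constructor
  · intro h v hv
    apply hv
    by_cases hm : v ∈ pre.filter (fun x => !(x == 0))
    · have hv2 := h v ((PySem.Set.mem_ofList _ _).mpr hm)
      have hm2 : PySem.Int.mod ((pre.filter (fun x => !(x == 0))).count v : Int) 2 = 0 := by
        simpa using hv2
      have := (PySem.Int.mod_eq_zero_iff_dvd _ _).mp hm2
      exact_mod_cast this
    · unfold cntNZ
      rw [List.count_eq_zero_of_not_mem hm]
      exact ⟨0, rfl⟩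
  · intro h v _
    have hdvd : 2 ∣ cntNZ pre v := by
      by_contra hc
      exact h v hc
    have h2 : (2:Int) ∣ ((pre.filter (fun x => !(x == 0))).count v : Int) := by
      exact_mod_cast hdvd
    simp [h2]

-- on a represented state, backlog-empty coincides with Source B's balanced test
theorem rep_empty_iff_balanced (b pre : List Int) (h : RepBacklog b pre) :
    (b = []) ↔ altBalanced pre = true := by
  rw [altBalanced_iff]
  constructor
  · intro hb v hv
    have := (h.2 v).mpr hv
    rw [hb] at this
    simp at this
  · intro hall
    apply List.eq_nil_iff_forall_not_mem.mpr
    intro v hv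
    exact hall v ((h.2 v).mp hv)

-- A's loop step on a duplicate-free backlog, in closed form (nonzero element)
theorem stepA_char (b out : List Int) (i e : Int) (hnd : b.Nodup) (he : e ≠ 0) :
    findZeroSwapsStepA (b, out) (i, e)
      = ((if e ∈ b then b.erase e else b ++ [e]),
         (if (if e ∈ b then b.erase e else b ++ [e]) = [] then out ++ [i] else out)) := by
  by_cases hm : e ∈ b
  · have hc : PySem.List.count (b ++ [e]) e = 2 := by
      simp [PySem.List.count_eq, List.count_append, List.count_eq_one_of_mem hnd hm]
    have hr1 : PySem.List.remove? (b ++ [e]) e = some ((b ++ [e]).erase e) :=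
      PySem.List.remove?_eq_some_erase (b ++ [e]) e (by simp)
    have he1 : (b ++ [e]).erase e = b.erase e ++ [e] := List.erase_append_left _ hm
    have hr2 : PySem.List.remove? (b.erase e ++ [e]) e
        = some ((b.erase e ++ [e]).erase e) :=
      PySem.List.remove?_eq_some_erase (b.erase e ++ [e]) e (by simp)
    have he2 : (b.erase e ++ [e]).erase e = b.erase e := by
      rw [List.erase_append_right _ (List.Nodup.not_mem_erase hnd)]; simp
    have h1 : (PySem.List.remove? (b ++ [e]) e).getD (b ++ [e]) = b.erase e ++ [e] := by
      rw [hr1, Option.getD_some, he1]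
    have h2 : (PySem.List.remove? (b.erase e ++ [e]) e).getD (b.erase e ++ [e]) = b.erase e := by
      rw [hr2, Option.getD_some, he2]
    simp only [findZeroSwapsStepA, he, if_false, hc, if_true, h1, h2, if_pos hm,
      List.length_eq_zero_iff]
    by_cases hz : b.erase e = [] <;> simp [hz]
  · have hc : PySem.List.count (b ++ [e]) e = 1 := by
      simp [PySem.List.count_eq, List.count_append, List.count_eq_zero_of_not_mem hm]
    simp only [findZeroSwapsStepA, he, if_false, hc, if_neg hm, List.length_eq_zero_iff]
    norm_num

-- the representation invariant survives one nonzero step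
theorem rep_step (b pre : List Int) (e : Int) (he : e ≠ 0) (h : RepBacklog b pre) :
    RepBacklog (if e ∈ b then b.erase e else b ++ [e]) (pre ++ [e]) := by
  obtain ⟨hnd, hmem⟩ := h
  constructor
  · split
    · exact hnd.erase e
    · next hm =>
      simp only [List.nodup_append, hnd, List.nodup_singleton, true_and]
      intro a ha x hx
      rw [List.mem_singleton] at hx
      subst hx
      exact fun hax => hm (hax ▸ ha)
  · intro v
    rw [cntNZ_append_ne pre e v he]
    by_cases hv : v = e
    · subst hv
      have h1 : (if v = v then (1:Nat) else 0) = 1 := if_pos rfl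
      rw [h1]
      by_cases hm : v ∈ b
      · rw [if_pos hm]
        have hodd := (hmem v).mp hm
        constructor
        · intro hin; exact absurd hin hnd.not_mem_erase
        · intro h2
          exfalso
          apply h2
          omega
      · rw [if_neg hm]
        have heven : 2 ∣ cntNZ pre v := by
          by_contra hc; exact hm ((hmem v).mpr hc)
        constructor
        · intro _; omega
        · intro _; exact List.mem_append.mpr (Or.inr (List.mem_singleton.mpr rfl))
    · have hcnt : cntNZ pre v + (if v = e then 1 else 0) = cntNZ pre v := by simp [hv]
      rw [hcnt, ← hmem v]
      split
      · exact List.mem_erase_of_ne hv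
      · simp [hv]

-- main loop lemma: A's fold from a represented state produces B's filtered indices
theorem loop_eq (arr : List Int) :
    ∀ (rest pre b out : List Int), arr = pre ++ rest → RepBacklog b pre →
      ((PySem.List.enumerate rest (pre.length : Int)).foldl findZeroSwapsStepA (b, out)).2
        = out ++ ((PySem.List.enumerate rest (pre.length : Int)).filter
            (fun p => p.2 == 0 || altBalanced (PySem.List.slice arr none (some (p.1 + 1))))).map (·.1) := by
  intro rest
  induction rest with
  | nil =>
    intro pre b out _ _
    simp [PySem.List.enumerate_nil]
  | cons e rest ih =>
    intro pre b out harr hrep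
    have htake : PySem.List.slice arr none (some ((pre.length : Int) + 1)) = pre ++ [e] := by
      have h1 : ((pre.length : Int) + 1) = ((pre.length + 1 : Nat) : Int) := by push_cast; ring
      rw [h1, PySem.List.slice_to_natCast]
      have : arr = (pre ++ [e]) ++ rest := by rw [harr]; simp
      rw [this]
      have hl : pre.length + 1 = (pre ++ [e]).length := by simp
      rw [hl, List.take_left]
    rw [PySem.List.enumerate_cons]
    by_cases he : e = 0
    · subst he
      have hstep : findZeroSwapsStepA (b, out) ((pre.length : Int), 0) = (b, out ++ [(pre.length : Int)]) := by
        simp [findZeroSwapsStepA]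
      have hrep' : RepBacklog b (pre ++ [0]) := by
        obtain ⟨hnd, hmem⟩ := hrep
        exact ⟨hnd, fun v => by rw [cntNZ_append_zero]; exact hmem v⟩
      have harr' : arr = (pre ++ [0]) ++ rest := by rw [harr]; simp
      have hlen : ((pre.length : Int) + 1) = (((pre ++ [0]).length : Nat) : Int) := by simp
      simp only [List.foldl_cons, hstep, List.filter_cons]
      rw [hlen] at *
      rw [ih (pre ++ [0]) b (out ++ [(pre.length : Int)]) harr' hrep']
      simp
    · have hstep := stepA_char b out (pre.length : Int) e hrep.1 he
      set b' := if e ∈ b then b.erase e else b ++ [e] with hb'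
      have hrep' : RepBacklog b' (pre ++ [e]) := rep_step b pre e he hrep
      have hbal : (b' = []) ↔ altBalanced (pre ++ [e]) = true := rep_empty_iff_balanced b' _ hrep'
      have harr' : arr = (pre ++ [e]) ++ rest := by rw [harr]; simp
      have hlen : ((pre.length : Int) + 1) = (((pre ++ [e]).length : Nat) : Int) := by simp
      simp only [List.foldl_cons, hstep, List.filter_cons, htake]
      by_cases hbe : b' = []
      · have hbt : altBalanced (pre ++ [e]) = true := hbal.mp hbe
        simp only [hbt, Bool.or_true, if_pos hbe]
        rw [hlen] at *
        rw [ih (pre ++ [e]) b' (out ++ [(pre.length : Int)]) harr' hrep']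
        simp [he]
      · have hbt : altBalanced (pre ++ [e]) = false := by
          cases hh : altBalanced (pre ++ [e])
          · rfl
          · exact absurd (hbal.mpr hh) hbe
        simp only [hbt, Bool.or_false, if_neg hbe]
        rw [hlen] at *
        rw [ih (pre ++ [e]) b' out harr' hrep']
        simp [he]

-- ===== VERDICT (by name: the statement is the Claim_ definition above) =====
theorem find_zero_swaps_spec : Claim_equal_find_zero_swaps := by
  intro arr _
  unfold Spec_find_zero_swaps find_zero_swaps find_zero_swaps_alt
  have := loop_eq arr arr [] [] [] (by simp) repBacklog_nil
  simpa using this
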